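-- pv_equiv track=rewrite | github.com/voldemort-coder/EscapeRoom | PythonClass/PythonCourses/PasswordChecker.py | verifica_parola
-- ===== SOURCE A (Python) =====
-- def verifica_parola(parola):
--     # Criterii pentru parola puternică
--     lungime_minima = len(parola) >= 8
--     contine_majuscula = any(char.isupper() for char in parola)
--     contine_minuscula = any(char.islower() for char in parola)
--     contine_cifra = any(char.isdigit() for char in parola)
--     contine_special = any(char in "!@#$%^&*()-_+=<>?" for char in parola)
--     fara_spatii = " " not in parola
--     # Verificăm dacă toate criteriile sunt îndeplinite
--     este_puternica = (
--         lungime_minima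
--         and contine_majuscula
--         and contine_minuscula
--         and contine_cifra
--         and contine_special
--         and fara_spatii
--     )
--     # Generăm feedback dacă parola este slabă
--     feedback = []
--     if not lungime_minima:
--         feedback.append("Lungimea trebuie să fie de cel puțin 8 caractere.")
--     if not contine_majuscula:
--         feedback.append("Trebuie să conțină cel puțin o literă majusculă.")
--     if not contine_minuscula:
--         feedback.append("Trebuie să conțină cel puțin o literă minusculă.")
--     if not contine_cifra:
--         feedback.append("Trebuie să conțină cel puțin o cifră.")
--     if not contine_special:
--         feedback.append("Trebuie să conțină cel puțin un caracter special (!@#$%^&*()-_+=<>?).")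
--     if not fara_spatii:
--         feedback.append("Nu trebuie să conțină spații.")
--
--     return este_puternica, feedback
-- ===== SOURCE B (Python) =====
-- def verifica_parola(parola):
--     # Single pass over the characters, maintaining one flag per character class.
--     has_upper = has_lower = has_digit = has_special = has_space = False
--     for char in parola:
--         if char.isupper():
--             has_upper = True
--         elif char.islower():
--             has_lower = True
--         elif char.isdigit():
--             has_digit = True
--         if char in "!@#$%^&*()-_+=<>?":
--             has_special = True
--         elif char == " ":
--             has_space = True
--     criteria = [
--         (len(parola) >= 8, "Lungimea trebuie să fie de cel puțin 8 caractere."),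
--         (has_upper, "Trebuie să conțină cel puțin o literă majusculă."),
--         (has_lower, "Trebuie să conțină cel puțin o literă minusculă."),
--         (has_digit, "Trebuie să conțină cel puțin o cifră."),
--         (has_special, "Trebuie să conțină cel puțin un caracter special (!@#$%^&*()-_+=<>?)."),
--         (not has_space, "Nu trebuie să conțină spații."),
--     ]
--     feedback = [msg for ok, msg in criteria if not ok]
--     return all(ok for ok, _ in criteria), feedback
-- ===== Notes on version B (the rewrite author's own statement) =====
-- stated objective: alternative
-- what changed: A runs six independent scans of the password (five any() generator scans plus a substring test); B makes a single pass maintaining one flag per character class and then builds the verdict and feedback from a criteria table of (flag, message) pairs.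
import Mathlib
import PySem

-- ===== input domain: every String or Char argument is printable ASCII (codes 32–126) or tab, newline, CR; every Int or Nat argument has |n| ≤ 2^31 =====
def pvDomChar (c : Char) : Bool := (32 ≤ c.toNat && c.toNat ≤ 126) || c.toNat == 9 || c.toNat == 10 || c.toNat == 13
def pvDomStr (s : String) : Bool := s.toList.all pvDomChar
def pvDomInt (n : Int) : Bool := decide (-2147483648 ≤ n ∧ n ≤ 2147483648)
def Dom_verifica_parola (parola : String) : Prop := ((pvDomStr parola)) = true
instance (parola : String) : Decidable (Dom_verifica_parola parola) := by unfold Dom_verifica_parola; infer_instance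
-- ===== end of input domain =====

-- B replaces A's six separate scans of the password by a single pass keeping one flag
-- per character class (objective: alternative decomposition, same asymptotic cost).

def pvSpecials : List Char := "!@#$%^&*()-_+=<>?".toList

def pvMsgLen : String := "Lungimea trebuie să fie de cel puțin 8 caractere."
def pvMsgUpper : String := "Trebuie să conțină cel puțin o literă majusculă."
def pvMsgLower : String := "Trebuie să conțină cel puțin o literă minusculă."
def pvMsgDigit : String := "Trebuie să conțină cel puțin o cifră."
def pvMsgSpecial : String := "Trebuie să conțină cel puțin un caracter special (!@#$%^&*()-_+=<>?)."
def pvMsgSpace : String := "Nu trebuie să conțină spații."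

-- ===== PORT A =====
def verifica_parola (parola : String) : Bool × List String :=
  let cs := parola.toList
  let lungime_minima := decide (8 ≤ PySem.Chars.len cs)
  let contine_majuscula := cs.any PySem.Chars.isupper
  let contine_minuscula := cs.any PySem.Chars.islower
  let contine_cifra := cs.any PySem.Chars.isdigit
  let contine_special := cs.any (fun c => PySem.Chars.isIn [c] pvSpecials)
  let fara_spatii := !(PySem.Chars.isIn [' '] cs)
  let este_puternica := lungime_minima && contine_majuscula && contine_minuscula
      && contine_cifra && contine_special && fara_spatii
  let feedback : List String :=
    (if !lungime_minima then [pvMsgLen] else []) ++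
    (if !contine_majuscula then [pvMsgUpper] else []) ++
    (if !contine_minuscula then [pvMsgLower] else []) ++
    (if !contine_cifra then [pvMsgDigit] else []) ++
    (if !contine_special then [pvMsgSpecial] else []) ++
    (if !fara_spatii then [pvMsgSpace] else [])
  (este_puternica, feedback)

-- ===== PORT B =====
-- one step of B's single loop: the if/elif chains of Source B
def pvStep (s : Bool × Bool × Bool × Bool × Bool) (c : Char) : Bool × Bool × Bool × Bool × Bool :=
  match s with
  | (u, l, d, sp, ws) =>
    let uld :=
      if PySem.Chars.isupper c then (true, l, d)
      else if PySem.Chars.islower c then (u, true, d)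
      else if PySem.Chars.isdigit c then (u, l, true)
      else (u, l, d)
    let spws :=
      if pvSpecials.contains c then (true, ws)
      else if c == ' ' then (sp, true)
      else (sp, ws)
    (uld.1, uld.2.1, uld.2.2, spws.1, spws.2)

def verifica_parola_alt (parola : String) : Bool × List String :=
  let st := parola.toList.foldl pvStep (false, false, false, false, false)
  let criteria : List (Bool × String) :=
    [ (decide (8 ≤ PySem.Chars.len parola.toList), pvMsgLen),
      (st.1, pvMsgUpper),
      (st.2.1, pvMsgLower),
      (st.2.2.1, pvMsgDigit),
      (st.2.2.2.1, pvMsgSpecial),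
      (!st.2.2.2.2, pvMsgSpace) ]
  (criteria.all (·.1), (criteria.filter (fun p => !p.1)).map (·.2))

-- ===== PRECONDITION & SPEC =====
def Spec_verifica_parola (parola : String) (out : Bool × List String) : Prop := out = verifica_parola_alt parola
instance (parola : String) (out : Bool × List String) : Decidable (Spec_verifica_parola parola out) := by unfold Spec_verifica_parola; infer_instance

-- ===== CLAIM (what is proved, stated in full; the proofs are below) =====
def Claim_equal_verifica_parola : Prop := ∀ (parola : String), Dom_verifica_parola parola → Spec_verifica_parola parola (verifica_parola parola)

-- ===== LEMMAS AND PROOFS =====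

-- membership of a one-character "substring" is list membership
lemma isIn_singleton (c : Char) (xs : List Char) :
    PySem.Chars.isIn [c] xs = xs.contains c := by
  rw [Bool.eq_iff_iff, PySem.Chars.isIn_iff_infix]
  simp [List.infix_iff_prefix_suffix]
  constructor
  · rintro ⟨t, ht, hsuf⟩
    exact (List.singleton_sublist.mp (ht.sublist.trans hsuf.sublist))
  · intro hmem
    obtain ⟨s, t, rfl⟩ := List.append_of_mem hmem
    exact ⟨[c] ++ t, by simp, ⟨s, by simp⟩⟩

lemma upper_not_lower (c : Char) (h : PySem.Chars.isupper c = true) : PySem.Chars.islower c = false := by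
  simp [PySem.Chars.isupper, PySem.Chars.islower, Char.le_def, UInt32.le_iff_toNat_le] at *; omega

lemma upper_not_digit (c : Char) (h : PySem.Chars.isupper c = true) : PySem.Chars.isdigit c = false := by
  simp [PySem.Chars.isupper, PySem.Chars.isdigit, Char.le_def, UInt32.le_iff_toNat_le] at *; omega

lemma lower_not_digit (c : Char) (h : PySem.Chars.islower c = true) : PySem.Chars.isdigit c = false := by
  simp [PySem.Chars.islower, PySem.Chars.isdigit, Char.le_def, UInt32.le_iff_toNat_le] at *; omega

lemma spec_not_space (c : Char) (h : pvSpecials.contains c = true) : (c == ' ') = false := by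
  rcases eq_or_ne c ' ' with rfl | hne
  · exact absurd h (by decide)
  · simp [hne]

-- B's loop computes exactly the five "any" scans of A
lemma foldl_pvStep (cs : List Char) (u l d sp ws : Bool) :
    cs.foldl pvStep (u, l, d, sp, ws) =
      (u || cs.any PySem.Chars.isupper,
       l || cs.any PySem.Chars.islower,
       d || cs.any PySem.Chars.isdigit,
       sp || cs.any (pvSpecials.contains ·),
       ws || cs.any (· == ' ')) := by
  induction cs generalizing u l d sp ws with
  | nil => simp
  | cons c cs ih =>
    simp only [List.foldl_cons, List.any_cons]
    have h1 : (if PySem.Chars.isupper c then ((true : Bool), l, d)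
        else if PySem.Chars.islower c then (u, true, d)
        else if PySem.Chars.isdigit c then (u, l, true)
        else (u, l, d)) = (u || PySem.Chars.isupper c, l || PySem.Chars.islower c, d || PySem.Chars.isdigit c) := by
      by_cases hu : PySem.Chars.isupper c
      · simp [hu, upper_not_lower c hu, upper_not_digit c hu]
      · by_cases hl : PySem.Chars.islower c
        · simp [hu, hl, lower_not_digit c hl]
        · by_cases hd : PySem.Chars.isdigit c <;> simp [hu, hl, hd]
    have h2 : (if pvSpecials.contains c then ((true : Bool), ws)
        else if c == ' ' then (sp, true)
        else (sp, ws)) = (sp || pvSpecials.contains c, ws || (c == ' ')) := by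
      by_cases hsp : pvSpecials.contains c = true
      · rw [if_pos hsp, hsp, spec_not_space c hsp]; simp
      · rw [if_neg hsp, Bool.not_eq_true] at *
        rw [hsp]
        by_cases hw : (c == ' ') = true
        · rw [if_pos hw, hw]; simp
        · rw [if_neg hw, Bool.not_eq_true] at *
          rw [hw]; simp
    have step : pvStep (u, l, d, sp, ws) c =
        (u || PySem.Chars.isupper c, l || PySem.Chars.islower c, d || PySem.Chars.isdigit c,
         sp || pvSpecials.contains c, ws || (c == ' ')) := by
      simp only [pvStep]
      rw [h1, h2]
    rw [step, ih]
    simp [Bool.or_assoc]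

lemma any_isIn_singleton (cs : List Char) :
    cs.any (fun c => PySem.Chars.isIn [c] pvSpecials) = cs.any (pvSpecials.contains ·) := by
  induction cs with
  | nil => rfl
  | cons c cs ih => simp only [List.any_cons, isIn_singleton, List.contains_eq_mem]

lemma isIn_space (cs : List Char) :
    PySem.Chars.isIn [' '] cs = cs.any (· == ' ') := by
  rw [isIn_singleton, Bool.eq_iff_iff]
  simp

-- ===== VERDICT (by name: the statement is the Claim_ definition above) =====
theorem verifica_parola_spec : Claim_equal_verifica_parola := by
  intro parola _
  show verifica_parola parola = verifica_parola_alt parola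
  simp only [verifica_parola, verifica_parola_alt, foldl_pvStep, any_isIn_singleton, isIn_space,
    Bool.false_or]
  generalize decide (8 ≤ PySem.Chars.len parola.toList) = L
  generalize parola.toList.any PySem.Chars.isupper = U
  generalize parola.toList.any PySem.Chars.islower = Lo
  generalize parola.toList.any PySem.Chars.isdigit = D
  generalize parola.toList.any (fun x => pvSpecials.contains x) = S
  generalize parola.toList.any (fun x => x == ' ') = W
  cases L <;> cases U <;> cases Lo <;> cases D <;> cases S <;> cases W <;> rfl
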